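-- pv_equiv track=rewrite | github.com/r3coder/2019-UGRP | src/CHAOS/FunctionsTime.py | TimeListReversed
-- ===== SOURCE A (Python) =====
-- def TimeValue(time):
--     return time[0]*60*24+time[1]*60+time[2]
--
-- def IsTimeInDuration(*args, **kwds):
--     if len(args) == 2 and len(args[0]) == 3 and len(args[1]) == 4: # td, tm mode
--         if TimeValue(args[0]) >= TimeValue(args[1]) and TimeValue(args[0]) < TimeValue(args[1])+args[1][3]:
--             return True
--         else:
--             return False
--
--     return False
--
-- def TimeListReversed(t, td):
--     tt = []
--     for i in range(len(t)):
--         tt.append((t[i][0], t[i][1], t[i][2], td[i]))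
--     lst = []
--     for day in range(0,5):
--         for hour in range (0,24):
--             tag = False
--             for v in tt:
--                 if IsTimeInDuration((day, hour, 0), v) == True: tag = True
--             if tag == False: lst.append((day, hour, 0))
--             tag = False
--             for v in tt:
--                 if IsTimeInDuration((day, hour, 30), v) == True: tag = True
--             if tag == False: lst.append((day, hour, 30))
--     return lst
-- ===== SOURCE B (Python) =====
-- def _coverage(t, td):
--     # 240-entry table: covered[s] == some interval covers slot value 30*s (s = day*48 + hour*2 + minute//30)
--     covered = [False] * 240
--     for row, d in zip(t, td):
--         tv = row[0] * 1440 + row[1] * 60 + row[2]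
--         lo = -((-tv) // 30)          # first slot index with 30*s >= tv
--         hi = -((-(tv + d)) // 30)    # first slot index with 30*s >= tv + d
--         for s in range(max(lo, 0), min(hi, 240)):
--             covered[s] = True
--     return covered
--
-- def TimeListReversed(t, td):
--     covered = _coverage(t, td)
--     return [(s // 48, (s % 48) // 2, 30 * (s % 2)) for s in range(240) if not covered[s]]
-- ===== Notes on version B (the rewrite author's own statement) =====
-- stated objective: faster
-- what changed: B replaces A's per-slot scan of all intervals (240 slots x n intervals, via tuple rebuild and IsTimeInDuration) by a 240-entry boolean coverage table filled once per interval from its ceil-divided slot-index range, followed by a single ordered emit pass over the table.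
import Mathlib
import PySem

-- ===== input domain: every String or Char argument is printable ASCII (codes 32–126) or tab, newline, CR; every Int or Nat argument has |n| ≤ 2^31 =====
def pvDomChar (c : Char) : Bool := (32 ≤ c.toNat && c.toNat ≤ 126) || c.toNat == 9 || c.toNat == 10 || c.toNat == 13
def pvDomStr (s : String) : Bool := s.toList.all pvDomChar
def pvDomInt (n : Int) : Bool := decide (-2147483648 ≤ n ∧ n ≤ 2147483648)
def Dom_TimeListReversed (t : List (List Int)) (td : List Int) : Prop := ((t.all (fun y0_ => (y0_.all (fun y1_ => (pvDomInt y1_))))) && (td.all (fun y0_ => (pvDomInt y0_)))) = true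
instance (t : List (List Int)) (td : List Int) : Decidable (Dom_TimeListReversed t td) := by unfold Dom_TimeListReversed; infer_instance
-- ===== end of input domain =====

-- B replaces A's per-slot scan of all intervals by an interval-range-filled 240-entry
-- boolean coverage table and a single ordered emit pass (faster: O(n+240) vs O(240*n) slot tests).

-- ===== PORT A =====
def pvTimeValue (time : List Int) : Int :=
  PySem.List.pyGetD time 0 0 * 60 * 24 + PySem.List.pyGetD time 1 0 * 60 + PySem.List.pyGetD time 2 0

-- IsTimeInDuration, specialised to its only call shape (tm a 3-tuple, v a 4-tuple, as lists)
def pvIsTimeInDuration (tm : List Int) (v : List Int) : Bool :=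
  if tm.length = 3 ∧ v.length = 4 then
    if pvTimeValue tm ≥ pvTimeValue v ∧ pvTimeValue tm < pvTimeValue v + PySem.List.pyGetD v 3 0
    then true else false
  else false

def TimeListReversed (t : List (List Int)) (td : List Int) : List (List Int) :=
  let tt := (PySem.List.pyRange 0 (PySem.List.len t) 1).foldl (fun tt i =>
      tt ++ [[PySem.List.pyGetD (PySem.List.pyGetD t i []) 0 0,
              PySem.List.pyGetD (PySem.List.pyGetD t i []) 1 0,
              PySem.List.pyGetD (PySem.List.pyGetD t i []) 2 0,
              PySem.List.pyGetD td i 0]]) []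
  (PySem.List.pyRange 0 5 1).foldl (fun lst day =>
    (PySem.List.pyRange 0 24 1).foldl (fun lst hour =>
      let tag := tt.foldl (fun tag v => if pvIsTimeInDuration [day, hour, 0] v = true then true else tag) false
      let lst := if tag = false then lst ++ [[day, hour, 0]] else lst
      let tag := tt.foldl (fun tag v => if pvIsTimeInDuration [day, hour, 30] v = true then true else tag) false
      if tag = false then lst ++ [[day, hour, 30]] else lst) lst) []

-- ===== PORT B =====
-- _coverage of Source B: the 240-entry boolean table, filled interval by interval
def pvCoverage (t : List (List Int)) (td : List Int) : List Bool :=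
  (t.zip td).foldl (fun covered p =>
      let tv := PySem.List.pyGetD p.1 0 0 * 1440 + PySem.List.pyGetD p.1 1 0 * 60 + PySem.List.pyGetD p.1 2 0
      let lo := -(PySem.Int.floordiv (-tv) 30)
      let hi := -(PySem.Int.floordiv (-(tv + p.2)) 30)
      (PySem.List.pyRange (max lo 0) (min hi 240) 1).foldl
        (fun c s => PySem.List.pySetD c s true) covered)
    (List.replicate 240 false)

def TimeListReversed_alt (t : List (List Int)) (td : List Int) : List (List Int) :=
  let covered := pvCoverage t td
  (PySem.List.pyRange 0 240 1).foldl (fun acc s =>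
      if PySem.List.pyGetD covered s false = false then
        acc ++ [[PySem.Int.floordiv s 48, PySem.Int.floordiv (PySem.Int.mod s 48) 2, 30 * PySem.Int.mod s 2]]
      else acc) []

-- ===== PRECONDITION & SPEC =====
-- A indexes t[i][0..2] and td[i]: it raises IndexError iff some row of t has fewer than 3
-- entries or td is shorter than t; Pre_ excludes exactly those inputs.
def Pre_TimeListReversed (t : List (List Int)) (td : List Int) : Prop :=
  t.length ≤ td.length ∧ ∀ r ∈ t, 3 ≤ r.length
instance (t : List (List Int)) (td : List Int) : Decidable (Pre_TimeListReversed t td) := by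
  unfold Pre_TimeListReversed; infer_instance

def pvWitness_TimeListReversed : List (List Int) × List Int := ([[0, 9, 0], [2, 13, 30]], [90, 60])

def Spec_TimeListReversed (t : List (List Int)) (td : List Int) (out : List (List Int)) : Prop := out = TimeListReversed_alt t td
instance (t : List (List Int)) (td : List Int) (out : List (List Int)) : Decidable (Spec_TimeListReversed t td out) := by unfold Spec_TimeListReversed; infer_instance

-- ===== CLAIM (what is proved, stated in full; the proofs are below) =====
def Claim_equal_TimeListReversed : Prop := ∀ (t : List (List Int)) (td : List Int), Dom_TimeListReversed t td → Pre_TimeListReversed t td → Spec_TimeListReversed t td (TimeListReversed t td)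

-- ===== LEMMAS AND PROOFS =====

-- time-value of an interval row paired with its duration
def pvTVZ (p : List Int × Int) : Int :=
  PySem.List.pyGetD p.1 0 0 * 1440 + PySem.List.pyGetD p.1 1 0 * 60 + PySem.List.pyGetD p.1 2 0

-- the 4-tuple A builds for one interval
def pvG (p : List Int × Int) : List Int :=
  [PySem.List.pyGetD p.1 0 0, PySem.List.pyGetD p.1 1 0, PySem.List.pyGetD p.1 2 0, p.2]

lemma pv_foldl_or {α : Type} (xs : List α) (p : α → Bool) (b : Bool) :
    xs.foldl (fun tag v => if p v = true then true else tag) b = (b || xs.any p) := by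
  induction xs generalizing b with
  | nil => simp
  | cons x xs ih =>
    simp only [List.foldl_cons, List.any_cons, ih]
    by_cases h : p x = true <;> cases b <;> simp [h]

lemma pv_isdur (d h mi : Int) (p : List Int × Int) :
    pvIsTimeInDuration [d, h, mi] (pvG p)
      = decide (pvTVZ p ≤ d*1440 + h*60 + mi ∧ d*1440 + h*60 + mi < pvTVZ p + p.2) := by
  have htm : pvTimeValue [d, h, mi] = d*60*24 + h*60 + mi := rfl
  have htv : pvTimeValue (pvG p)
      = PySem.List.pyGetD p.1 0 0 * 60 * 24 + PySem.List.pyGetD p.1 1 0 * 60 + PySem.List.pyGetD p.1 2 0 := rfl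
  have hd3 : PySem.List.pyGetD (pvG p) 3 0 = p.2 := rfl
  unfold pvIsTimeInDuration
  rw [if_pos (⟨rfl, rfl⟩ : ([d,h,mi] : List Int).length = 3 ∧ (pvG p).length = 4)]
  by_cases hc : pvTVZ p ≤ d*1440 + h*60 + mi ∧ d*1440 + h*60 + mi < pvTVZ p + p.2
  · rw [if_pos (by rw [htm, htv, hd3]; unfold pvTVZ at hc; constructor <;> omega),
        decide_eq_true hc]
  · rw [if_neg (by rw [htm, htv, hd3]; unfold pvTVZ at hc; omega),
        decide_eq_false hc]

lemma pv_any_isdur (zs : List (List Int × Int)) (d h mi : Int) :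
    (zs.map pvG).any (fun v => pvIsTimeInDuration [d, h, mi] v)
      = zs.any (fun p => decide (pvTVZ p ≤ d*1440 + h*60 + mi ∧ d*1440 + h*60 + mi < pvTVZ p + p.2)) := by
  rw [List.any_map]
  exact List.any_congr rfl (fun p => pv_isdur d h mi p)

lemma pv_tt_eq (t : List (List Int)) (td : List Int) (hp : Pre_TimeListReversed t td) :
    (PySem.List.pyRange 0 (PySem.List.len t) 1).foldl (fun tt i =>
      tt ++ [[PySem.List.pyGetD (PySem.List.pyGetD t i []) 0 0,
              PySem.List.pyGetD (PySem.List.pyGetD t i []) 1 0,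
              PySem.List.pyGetD (PySem.List.pyGetD t i []) 2 0,
              PySem.List.pyGetD td i 0]]) []
    = (t.zip td).map pvG := by
  obtain ⟨hlen, _⟩ := hp
  rw [PySem.List.foldl_append_singleton_eq_map, List.nil_append]
  apply List.ext_getElem
  · simp [PySem.List.length_pyRange_one, PySem.List.len]
    omega
  · intro k hk1 hk2
    have hkt : k < t.length := by
      simpa [PySem.List.length_pyRange_one, PySem.List.len] using hk1
    have hktd : k < td.length := by omega
    simp [PySem.List.getElem_pyRange_one, pvG, List.getElem_zip, List.getD_eq_getElem?_getD,
          hkt, hktd]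

-- ceiling bracket: q = -((-x) // 30) satisfies (q-1)*30 < x ≤ q*30
lemma pv_ceil_bounds (x : Int) :
    (-(PySem.Int.floordiv (-x) 30) - 1) * 30 < x ∧ x ≤ -(PySem.Int.floordiv (-x) 30) * 30 :=
  (PySem.Int.neg_floordiv_neg_eq_iff_of_pos (by norm_num)).mp rfl

lemma pv_mark_len (r : List Int) (cov : List Bool) :
    (r.foldl (fun c s => PySem.List.pySetD c s true) cov).length = cov.length := by
  induction r generalizing cov with
  | nil => rfl
  | cons x xs ih => simp [ih, PySem.List.length_pySetD]

lemma pv_mark_getD_aux (n : Nat) : ∀ (a b : Int) (cov : List Bool) (m : Int),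
    (b - a).toNat = n → 0 ≤ a → b ≤ (cov.length : Int) → 0 ≤ m → m < (cov.length : Int) →
    PySem.List.pyGetD ((PySem.List.pyRange a b 1).foldl (fun c s => PySem.List.pySetD c s true) cov) m false
      = if a ≤ m ∧ m < b then true else PySem.List.pyGetD cov m false := by
  induction n with
  | zero =>
    intro a b cov m hn ha hb hm0 hm1
    rw [PySem.List.pyRange_one_eq_nil (by omega)]
    simp only [List.foldl_nil]
    rw [if_neg (by omega)]
  | succ n ih =>
    intro a b cov m hn ha hb hm0 hm1
    have hab : a < b := by omega
    rw [PySem.List.pyRange_one_cons hab]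
    simp only [List.foldl_cons]
    have hsetlen : (PySem.List.pySetD cov a true).length = cov.length := by
      rw [PySem.List.pySetD_of_nonneg cov true ha]; simp
    rw [ih (a+1) b (PySem.List.pySetD cov a true) m (by omega) (by omega)
        (by rw [hsetlen]; exact hb) hm0 (by rw [hsetlen]; exact hm1)]
    have e1 : PySem.List.pyGetD (PySem.List.pySetD cov a true) m false
        = if m = a then true else PySem.List.pyGetD cov m false := by
      rw [PySem.List.pySetD_of_nonneg cov true ha,
          PySem.List.pyGetD_eq_getElem _ false hm0 (by simpa using hm1),
          PySem.List.pyGetD_eq_getElem cov false hm0 hm1,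
          List.getElem_set]
      by_cases hma : m = a
      · rw [if_pos (by omega), if_pos hma]
      · rw [if_neg (by omega), if_neg hma]
    rw [e1]
    split_ifs with h1 h2 h3 <;> first | rfl | omega

lemma pv_mark_getD (a b : Int) (cov : List Bool) (m : Int) (ha : 0 ≤ a) (hb : b ≤ (cov.length : Int))
    (hm0 : 0 ≤ m) (hm1 : m < (cov.length : Int)) :
    PySem.List.pyGetD ((PySem.List.pyRange a b 1).foldl (fun c s => PySem.List.pySetD c s true) cov) m false
      = if a ≤ m ∧ m < b then true else PySem.List.pyGetD cov m false :=
  pv_mark_getD_aux (b - a).toNat a b cov m rfl ha hb hm0 hm1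

lemma pv_cov_getD (ps : List (List Int × Int)) (cov : List Bool) (hlen : cov.length = 240)
    (m : Int) (hm0 : 0 ≤ m) (hm1 : m < 240) :
    PySem.List.pyGetD (ps.foldl (fun covered p =>
        let tv := PySem.List.pyGetD p.1 0 0 * 1440 + PySem.List.pyGetD p.1 1 0 * 60 + PySem.List.pyGetD p.1 2 0
        let lo := -(PySem.Int.floordiv (-tv) 30)
        let hi := -(PySem.Int.floordiv (-(tv + p.2)) 30)
        (PySem.List.pyRange (max lo 0) (min hi 240) 1).foldl
          (fun c s => PySem.List.pySetD c s true) covered) cov) m false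
      = (ps.any (fun p => decide (pvTVZ p ≤ 30*m ∧ 30*m < pvTVZ p + p.2)) || PySem.List.pyGetD cov m false) := by
  induction ps generalizing cov with
  | nil => simp
  | cons p rest ih =>
    simp only [List.foldl_cons, List.any_cons]
    rw [ih _ (by rw [pv_mark_len]; exact hlen)]
    rw [pv_mark_getD _ _ _ _ (le_max_right _ _) (by rw [hlen]; exact_mod_cast min_le_right _ 240)
        hm0 (by rw [hlen]; exact_mod_cast hm1)]
    have hc1 := pv_ceil_bounds (PySem.List.pyGetD p.1 0 0 * 1440 + PySem.List.pyGetD p.1 1 0 * 60 + PySem.List.pyGetD p.1 2 0)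
    have hc2 := pv_ceil_bounds (PySem.List.pyGetD p.1 0 0 * 1440 + PySem.List.pyGetD p.1 1 0 * 60 + PySem.List.pyGetD p.1 2 0 + p.2)
    have hiff : (max (-(PySem.Int.floordiv (-(PySem.List.pyGetD p.1 0 0 * 1440 + PySem.List.pyGetD p.1 1 0 * 60 + PySem.List.pyGetD p.1 2 0)) 30)) 0 ≤ m ∧
        m < min (-(PySem.Int.floordiv (-(PySem.List.pyGetD p.1 0 0 * 1440 + PySem.List.pyGetD p.1 1 0 * 60 + PySem.List.pyGetD p.1 2 0 + p.2)) 30)) 240)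
        ↔ (pvTVZ p ≤ 30*m ∧ 30*m < pvTVZ p + p.2) := by
      unfold pvTVZ
      constructor <;> intro hcl <;> constructor <;> omega
    by_cases hcv : pvTVZ p ≤ 30*m ∧ 30*m < pvTVZ p + p.2
    · rw [if_pos (hiff.mpr hcv), decide_eq_true hcv]
      simp
    · rw [if_neg (fun hx => hcv (hiff.mp hx)), decide_eq_false hcv]
      simp

lemma pv_replicate_getD (n : Nat) (m : Int) (hm0 : 0 ≤ m) (hm1 : m < (n : Int)) :
    PySem.List.pyGetD (List.replicate n false) m false = false := by
  rw [PySem.List.pyGetD_eq_getElem _ false hm0 (by simpa using hm1), List.getElem_replicate]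

lemma pv_coverage_getD (t : List (List Int)) (td : List Int) (m : Int)
    (hm0 : 0 ≤ m) (hm1 : m < 240) :
    PySem.List.pyGetD (pvCoverage t td) m false
      = (t.zip td).any (fun p => decide (pvTVZ p ≤ 30*m ∧ 30*m < pvTVZ p + p.2)) := by
  unfold pvCoverage
  rw [pv_cov_getD _ _ List.length_replicate m hm0 hm1, pv_replicate_getD 240 m hm0 (by exact_mod_cast hm1)]
  simp

lemma pv_flatMap_congr {α β : Type} (xs : List α) (f g : α → List β)
    (h : ∀ x ∈ xs, f x = g x) : xs.flatMap f = xs.flatMap g := by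
  induction xs with
  | nil => rfl
  | cons x xs ih => simp_all [List.flatMap_cons]

lemma pv_flatMap_assoc {α β γ : Type} (xs : List α) (f : α → List β) (g : β → List γ) :
    (xs.flatMap f).flatMap g = xs.flatMap (fun x => (f x).flatMap g) := by
  induction xs with
  | nil => rfl
  | cons x xs ih => simp [List.flatMap_cons, List.flatMap_append, ih]

lemma pv_body (lst : List (List Int)) (a b : List Int) (c1 c2 : Bool) :
    (if c2 = false then (if c1 = false then lst ++ [a] else lst) ++ [b]
     else (if c1 = false then lst ++ [a] else lst))
      = lst ++ ((if c1 then [] else [a]) ++ (if c2 then [] else [b])) := by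
  cases c1 <;> cases c2 <;> simp

lemma pv_foldl_ite {α β : Type} (xs : List α) (p : α → Bool) (f : α → List β) (acc : List β) :
    xs.foldl (fun acc x => if p x = false then acc ++ f x else acc) acc
      = acc ++ xs.flatMap (fun x => if p x then [] else f x) := by
  induction xs generalizing acc with
  | nil => simp
  | cons x xs ih => cases h : p x <;> simp [ih, h, List.append_assoc]

lemma pv_loopA (P : Int → Int → Int → Bool) :
    (PySem.List.pyRange 0 5 1).foldl (fun lst day =>
      (PySem.List.pyRange 0 24 1).foldl (fun lst hour =>
        if P day hour 30 = false then
          (if P day hour 0 = false then lst ++ [[day, hour, 0]] else lst) ++ [[day, hour, 30]]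
        else
          (if P day hour 0 = false then lst ++ [[day, hour, 0]] else lst)) lst) []
    = (PySem.List.pyRange 0 5 1).flatMap (fun day =>
        (PySem.List.pyRange 0 24 1).flatMap (fun hour =>
          (if P day hour 0 then [] else [[day, hour, 0]]) ++
          (if P day hour 30 then [] else [[day, hour, 30]]))) := by
  simp only [pv_body, PySem.List.foldl_append_eq_flatMap, List.nil_append]

lemma pv_A_eq (t : List (List Int)) (td : List Int) (hpre : Pre_TimeListReversed t td) :
    TimeListReversed t td
      = (PySem.List.pyRange 0 5 1).flatMap (fun day =>
          (PySem.List.pyRange 0 24 1).flatMap (fun hour =>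
            (if (t.zip td).any (fun p => decide (pvTVZ p ≤ day*1440 + hour*60 + 0 ∧ day*1440 + hour*60 + 0 < pvTVZ p + p.2))
             then [] else [[day, hour, 0]]) ++
            (if (t.zip td).any (fun p => decide (pvTVZ p ≤ day*1440 + hour*60 + 30 ∧ day*1440 + hour*60 + 30 < pvTVZ p + p.2))
             then [] else [[day, hour, 30]]))) := by
  conv_lhs => rw [TimeListReversed]
  rw [pv_tt_eq t td hpre]
  simp only [pv_foldl_or, Bool.false_or, pv_any_isdur]
  exact pv_loopA (fun day hour mi => (t.zip td).any
    (fun p => decide (pvTVZ p ≤ day*1440 + hour*60 + mi ∧ day*1440 + hour*60 + mi < pvTVZ p + p.2)))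

set_option maxRecDepth 20000 in
lemma pv_range_decomp :
    PySem.List.pyRange 0 240 1
      = (PySem.List.pyRange 0 5 1).flatMap (fun day =>
          (PySem.List.pyRange 0 24 1).flatMap (fun hour =>
            [day*48 + 2*hour, day*48 + 2*hour + 1])) := by
  decide

-- B as a flatMap over the 240 slot indices
lemma pv_B_eq (t : List (List Int)) (td : List Int) :
    TimeListReversed_alt t td
      = (PySem.List.pyRange 0 240 1).flatMap (fun s =>
          if PySem.List.pyGetD (pvCoverage t td) s false then []
          else [[PySem.Int.floordiv s 48, PySem.Int.floordiv (PySem.Int.mod s 48) 2, 30 * PySem.Int.mod s 2]]) := by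
  unfold TimeListReversed_alt
  simp only [pv_foldl_ite, List.nil_append]

-- ===== VERDICT (by name: the statement is the Claim_ definition above) =====
theorem TimeListReversed_spec : Claim_equal_TimeListReversed := by
  intro t td _ hpre
  unfold Spec_TimeListReversed
  rw [pv_A_eq t td hpre, pv_B_eq, pv_range_decomp]
  simp only [pv_flatMap_assoc, List.flatMap_cons, List.flatMap_nil, List.append_nil]
  apply pv_flatMap_congr
  intro day hday
  apply pv_flatMap_congr
  intro hour hhour
  rw [PySem.List.mem_pyRange_one] at hday hhour
  have hd30 : PySem.Int.floordiv (day*48 + 2*hour) 48 = day :=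
    (PySem.Int.floordiv_eq_iff_of_pos (by norm_num)).mpr (by omega)
  have hd31 : PySem.Int.floordiv (day*48 + 2*hour + 1) 48 = day :=
    (PySem.Int.floordiv_eq_iff_of_pos (by norm_num)).mpr (by omega)
  have hm30 : PySem.Int.mod (day*48 + 2*hour) 48 = 2*hour := by
    have := PySem.Int.floordiv_mul_add_mod (day*48 + 2*hour) 48
    rw [hd30] at this; omega
  have hm31 : PySem.Int.mod (day*48 + 2*hour + 1) 48 = 2*hour + 1 := by
    have := PySem.Int.floordiv_mul_add_mod (day*48 + 2*hour + 1) 48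
    rw [hd31] at this; omega
  have hh0 : PySem.Int.floordiv (2*hour) 2 = hour :=
    (PySem.Int.floordiv_eq_iff_of_pos (by norm_num)).mpr (by omega)
  have hh1 : PySem.Int.floordiv (2*hour + 1) 2 = hour :=
    (PySem.Int.floordiv_eq_iff_of_pos (by norm_num)).mpr (by omega)
  have hp0 : PySem.Int.mod (day*48 + 2*hour) 2 = 0 := by
    have h2 := PySem.Int.floordiv_mul_add_mod (day*48 + 2*hour) 2
    have hq : PySem.Int.floordiv (day*48 + 2*hour) 2 = day*24 + hour :=
      (PySem.Int.floordiv_eq_iff_of_pos (by norm_num)).mpr (by omega)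
    rw [hq] at h2; omega
  have hp1 : PySem.Int.mod (day*48 + 2*hour + 1) 2 = 1 := by
    have h2 := PySem.Int.floordiv_mul_add_mod (day*48 + 2*hour + 1) 2
    have hq : PySem.Int.floordiv (day*48 + 2*hour + 1) 2 = day*24 + hour :=
      (PySem.Int.floordiv_eq_iff_of_pos (by norm_num)).mpr (by omega)
    rw [hq] at h2; omega
  rw [pv_coverage_getD t td (day*48 + 2*hour) (by omega) (by omega),
      pv_coverage_getD t td (day*48 + 2*hour + 1) (by omega) (by omega),
      hd30, hd31, hm30, hm31, hh0, hh1, hp0, hp1]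
  simp only [show (30*(day*48 + 2*hour) : Int) = day*1440 + hour*60 + 0 from by ring,
             show (30*(day*48 + 2*hour + 1) : Int) = day*1440 + hour*60 + 30 from by ring,
             show ((30:Int)*0 : Int) = 0 from by norm_num,
             show ((30:Int)*1 : Int) = 30 from by norm_num]
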